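-- pv_equiv track=rewrite | github.com/guzhuofan/multi-agent-learning-system | backend/app/services/agent_manager.py | _generate_context_summary
-- ===== SOURCE A (Python) =====
-- from typing import Dict, List, Optional, Any
--
-- def _generate_context_summary(messages: List[Dict]) -> str:
--     """生成上下文摘要（简化版本）"""
--     if not messages:
--         return "无对话历史"
--
--     # 提取关键信息
--     user_messages = [msg for msg in messages if msg["role"] == "user"]
--     assistant_messages = [msg for msg in messages if msg["role"] == "assistant"]
--
--     summary_parts = []
--
--     if user_messages:
--         # 获取最近的用户问题
--         recent_questions = [msg["content"][:100] for msg in user_messages[-3:]]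
--         summary_parts.append(f"最近讨论的问题: {'; '.join(recent_questions)}")
--
--     if assistant_messages:
--         # 获取关键回答片段
--         recent_answers = [msg["content"][:100] for msg in assistant_messages[-2:]]
--         summary_parts.append(f"相关回答要点: {'; '.join(recent_answers)}")
--
--     summary_parts.append(f"对话轮次: {len(messages)}")
--
--     return " | ".join(summary_parts)
-- ===== SOURCE B (Python) =====
-- def _generate_context_summary(messages):
--     """Single reverse scan with capped accumulators instead of two full role-filter passes."""
--     if not messages:
--         return "无对话历史"
--
--     users = []      # last user contents, newest first, at most 3
--     answers = []    # last assistant contents, newest first, at most 2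
--     for msg in reversed(messages):
--         if len(users) < 3 and msg["role"] == "user":
--             users.append(msg["content"][:100])
--         elif len(answers) < 2 and msg["role"] == "assistant":
--             answers.append(msg["content"][:100])
--         if len(users) == 3 and len(answers) == 2:
--             break
--
--     parts = []
--     if users:
--         parts.append("最近讨论的问题: " + "; ".join(reversed(users)))
--     if answers:
--         parts.append("相关回答要点: " + "; ".join(reversed(answers)))
--     parts.append("对话轮次: " + str(len(messages)))
--     return " | ".join(parts)
-- ===== Notes on version B (the rewrite author's own statement) =====
-- stated objective: alternative
-- what changed: Replaces the two full role-filter comprehensions plus tail slicing by a single backward scan that accumulates at most 3 user and 2 assistant truncated contents and stops early once both caps are full, then reverses them back to chronological order.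
import Mathlib
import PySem

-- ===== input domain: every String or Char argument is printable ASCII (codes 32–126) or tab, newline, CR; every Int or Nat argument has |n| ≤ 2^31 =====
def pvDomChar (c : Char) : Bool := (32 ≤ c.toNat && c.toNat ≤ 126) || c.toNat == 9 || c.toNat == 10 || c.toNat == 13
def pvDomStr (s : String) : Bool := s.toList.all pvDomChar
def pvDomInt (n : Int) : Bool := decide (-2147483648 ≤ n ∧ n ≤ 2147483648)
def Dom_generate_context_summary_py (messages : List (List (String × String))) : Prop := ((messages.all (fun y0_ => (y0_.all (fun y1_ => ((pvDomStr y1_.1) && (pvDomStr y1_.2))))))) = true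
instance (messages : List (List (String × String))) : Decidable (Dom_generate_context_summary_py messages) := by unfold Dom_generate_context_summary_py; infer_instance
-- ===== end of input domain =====

-- B replaces A's two full role-filter passes plus tail slicing by one capped backward scan with
-- early exit; identical strings, return-value equivalence on Pre_ (A raises KeyError outside it).

-- ===== PORT A =====
-- shared helpers: both Pythons read msg["role"] and msg["content"][:100] identically
def pvRole (m : List (String × String)) : String := ((PySem.Dict.mk m).get? "role").getD ""
def pvTrunc (m : List (String × String)) : String :=
  PySem.Str.slice (((PySem.Dict.mk m).get? "content").getD "") none (some 100)

def generate_context_summary_py (messages : List (List (String × String))) : String :=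
  if messages.isEmpty then "无对话历史" else
  let user_messages := messages.filter (fun m => pvRole m == "user")
  let assistant_messages := messages.filter (fun m => pvRole m == "assistant")
  let summary_parts : List String := []
  let summary_parts := if user_messages.isEmpty then summary_parts else
    summary_parts ++ ["最近讨论的问题: " ++ PySem.Str.join "; " ((PySem.List.slice user_messages (some (-3)) none).map pvTrunc)]
  let summary_parts := if assistant_messages.isEmpty then summary_parts else
    summary_parts ++ ["相关回答要点: " ++ PySem.Str.join "; " ((PySem.List.slice assistant_messages (some (-2)) none).map pvTrunc)]
  let summary_parts := summary_parts ++ ["对话轮次: " ++ PySem.Int.toStr (messages.length : Int)]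
  PySem.Str.join " | " summary_parts

-- ===== PORT B =====
-- Source B's for-loop over reversed(messages): capped accumulation with early break
def pvCollect : List (List (String × String)) → List String → List String → (List String × List String)
  | [], users, answers => (users, answers)
  | m :: rest, users, answers =>
    let p :=
      if users.length < 3 && pvRole m == "user" then (users ++ [pvTrunc m], answers)
      else if answers.length < 2 && pvRole m == "assistant" then (users, answers ++ [pvTrunc m])
      else (users, answers)
    if p.1.length == 3 && p.2.length == 2 then p else pvCollect rest p.1 p.2

def generate_context_summary_py_alt (messages : List (List (String × String))) : String :=
  if messages.isEmpty then "无对话历史" else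
  let ua := pvCollect messages.reverse [] []
  let parts : List String := []
  let parts := if ua.1.isEmpty then parts else
    parts ++ ["最近讨论的问题: " ++ PySem.Str.join "; " ua.1.reverse]
  let parts := if ua.2.isEmpty then parts else
    parts ++ ["相关回答要点: " ++ PySem.Str.join "; " ua.2.reverse]
  let parts := parts ++ ["对话轮次: " ++ PySem.Int.toStr (messages.length : Int)]
  PySem.Str.join " | " parts

-- ===== PRECONDITION & SPEC =====
-- Pre_ excludes exactly the inputs where the Python A raises KeyError: a message missing "role",
-- or a message among the kept tails (last 3 user / last 2 assistant messages) missing "content".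
def Pre_generate_context_summary_py (messages : List (List (String × String))) : Prop :=
  (messages.all (fun m => (PySem.Dict.mk m).contains "role")) = true ∧
  (((messages.filter (fun m => ((PySem.Dict.mk m).get? "role").getD "" == "user")).reverse.take 3).all
      (fun m => (PySem.Dict.mk m).contains "content")) = true ∧
  (((messages.filter (fun m => ((PySem.Dict.mk m).get? "role").getD "" == "assistant")).reverse.take 2).all
      (fun m => (PySem.Dict.mk m).contains "content")) = true
instance (messages : List (List (String × String))) : Decidable (Pre_generate_context_summary_py messages) := by
  unfold Pre_generate_context_summary_py; infer_instance

def pvWitness_generate_context_summary_py : (List (List (String × String))) :=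
  [[("role", "user"), ("content", "hi")], [("role", "assistant"), ("content", "hello")]]

def Spec_generate_context_summary_py (messages : List (List (String × String))) (out : String) : Prop := out = generate_context_summary_py_alt messages
instance (messages : List (List (String × String))) (out : String) : Decidable (Spec_generate_context_summary_py messages out) := by unfold Spec_generate_context_summary_py; infer_instance

-- ===== CLAIM (what is proved, stated in full; the proofs are below) =====
def Claim_equal_generate_context_summary_py : Prop := ∀ (messages : List (List (String × String))), Dom_generate_context_summary_py messages → Pre_generate_context_summary_py messages → Spec_generate_context_summary_py messages (generate_context_summary_py messages)

-- ===== LEMMAS AND PROOFS =====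

-- the capped backward loop computes exactly "first 3 user / first 2 assistant truncated contents"
-- of its input list, appended to the accumulators (the early break adds nothing: full lists accept nothing more)
lemma pvCollect_spec (l : List (List (String × String))) (users answers : List String) :
    pvCollect l users answers =
      (users ++ ((l.filter (fun m => pvRole m == "user")).map pvTrunc).take (3 - users.length),
       answers ++ ((l.filter (fun m => pvRole m == "assistant")).map pvTrunc).take (2 - answers.length)) := by
  induction l generalizing users answers with
  | nil => simp [pvCollect]
  | cons m rest ih =>
    by_cases hu : pvRole m = "user" <;> by_cases ha : pvRole m = "assistant"
    · exact absurd (hu ▸ ha) (by decide)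
    · -- user message
      by_cases hlt : users.length < 3
      · have h3 : 3 - users.length = (2 - users.length) + 1 := by omega
        by_cases hbrk : users.length + 1 = 3 ∧ answers.length = 2
        · simp [pvCollect, hu, hlt, hbrk.1, hbrk.2, h3, List.take_succ_cons]
          omega
        · simp [pvCollect, hu, hlt, ih, h3, List.take_succ_cons, List.append_assoc]
          omega
      · by_cases hbrk : users.length = 3 ∧ answers.length = 2
        · simp [pvCollect, hu, hbrk.1, hbrk.2]
        · have hnb : ¬((users.length == 3 && answers.length == 2) = true) := by
            simp only [Bool.and_eq_true, beq_iff_eq]; exact fun h => hbrk ⟨h.1, h.2⟩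
          have h0 : 3 - users.length = 0 := by omega
          simp [pvCollect, hu, hlt, hnb, ih, h0]
    · -- assistant message
      by_cases hlt : answers.length < 2
      · have h2 : 2 - answers.length = (1 - answers.length) + 1 := by omega
        by_cases hbrk : users.length = 3 ∧ answers.length + 1 = 2
        · simp [pvCollect, ha, hlt, hbrk.1, hbrk.2, h2, List.take_succ_cons]
          omega
        · simp [pvCollect, ha, hlt, ih, h2, List.take_succ_cons, List.append_assoc]
          omega
      · by_cases hbrk : users.length = 3 ∧ answers.length = 2
        · simp [pvCollect, ha, hbrk.1, hbrk.2]
        · have hnb : ¬((users.length == 3 && answers.length == 2) = true) := by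
            simp only [Bool.and_eq_true, beq_iff_eq]; exact fun h => hbrk ⟨h.1, h.2⟩
          have h0 : 2 - answers.length = 0 := by omega
          simp [pvCollect, ha, hlt, hnb, ih, h0]
    · -- neither role
      by_cases hbrk : users.length = 3 ∧ answers.length = 2
      · simp [pvCollect, hu, ha, hbrk.1, hbrk.2]
      · have hnb : ¬((users.length == 3 && answers.length == 2) = true) := by
          simp only [Bool.and_eq_true, beq_iff_eq]; exact fun h => hbrk ⟨h.1, h.2⟩
        simp [pvCollect, hu, ha, hnb, ih]

-- B's reversed user accumulator IS A's user_messages[-3:] mapped through the truncation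
lemma collect_fst (messages : List (List (String × String))) :
    (pvCollect messages.reverse [] []).1.reverse
      = (PySem.List.slice (messages.filter (fun m => pvRole m == "user")) (some (-3)) none).map pvTrunc := by
  rw [pvCollect_spec, PySem.List.slice_from_neg_ofNat _ 3 (by omega)]
  simp [List.filter_reverse, List.map_reverse, List.take_reverse, List.map_drop]

lemma collect_snd (messages : List (List (String × String))) :
    (pvCollect messages.reverse [] []).2.reverse
      = (PySem.List.slice (messages.filter (fun m => pvRole m == "assistant")) (some (-2)) none).map pvTrunc := by
  rw [pvCollect_spec, PySem.List.slice_from_neg_ofNat _ 2 (by omega)]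
  simp [List.filter_reverse, List.map_reverse, List.take_reverse, List.map_drop]

lemma collect_fst_empty (messages : List (List (String × String))) :
    (pvCollect messages.reverse [] []).1.isEmpty
      = (messages.filter (fun m => pvRole m == "user")).isEmpty := by
  rw [pvCollect_spec, Bool.eq_iff_iff]
  simp [List.filter_reverse, List.map_reverse, List.isEmpty_iff, List.take_eq_nil_iff,
    List.reverse_eq_nil_iff, List.map_eq_nil_iff]

lemma collect_snd_empty (messages : List (List (String × String))) :
    (pvCollect messages.reverse [] []).2.isEmpty
      = (messages.filter (fun m => pvRole m == "assistant")).isEmpty := by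
  rw [pvCollect_spec, Bool.eq_iff_iff]
  simp [List.filter_reverse, List.map_reverse, List.isEmpty_iff, List.take_eq_nil_iff,
    List.reverse_eq_nil_iff, List.map_eq_nil_iff]

-- ===== VERDICT (by name: the statement is the Claim_ definition above) =====
theorem generate_context_summary_py_spec : Claim_equal_generate_context_summary_py := by
  intro messages _ _
  unfold Spec_generate_context_summary_py
  by_cases he : messages.isEmpty
  · simp [generate_context_summary_py, generate_context_summary_py_alt, he]
  · simp only [generate_context_summary_py, generate_context_summary_py_alt, he,
      Bool.false_eq_true, if_false, collect_fst, collect_snd, collect_fst_empty, collect_snd_empty]
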